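-- pv_equiv track=rewrite | github.com/eunchae2000/algorithm_test | level1/문자열나누기.py | solution
-- ===== SOURCE A (Python) =====
-- def solution(s):
--     answer = 0
--     count1 , count2 = 0, 0
--     for i in s:
--         if count1 == count2 :
--             answer += 1
--             current = i
--         if current == i:
--             count1 += 1
--         else:
--             count2 += 1
--     return answer
-- ===== SOURCE B (Python) =====
-- def solution(s):
--     # Recursive split: peel off one balanced segment at a time.  A segment
--     # of length j is balanced exactly when its leader occurs j/2 times in it,
--     # so we only count leader matches and test 2*matches == length.
--     if not s:
--         return 0
--     leader = s[0]
--     matches = 0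
--     for j, c in enumerate(s, 1):
--         matches += (c == leader)
--         if 2 * matches == j:
--             return 1 + solution(s[j:])
--     return 1
-- ===== Notes on version B (the rewrite author's own statement) =====
-- stated objective: alternative
-- what changed: Replaces A's single flat pass with two ever-growing global counters by a recursive peel-off: each call counts only occurrences of the segment leader, detects a balanced segment via 2*matches == length, and recurses on the sliced-off suffix.
import Mathlib
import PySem

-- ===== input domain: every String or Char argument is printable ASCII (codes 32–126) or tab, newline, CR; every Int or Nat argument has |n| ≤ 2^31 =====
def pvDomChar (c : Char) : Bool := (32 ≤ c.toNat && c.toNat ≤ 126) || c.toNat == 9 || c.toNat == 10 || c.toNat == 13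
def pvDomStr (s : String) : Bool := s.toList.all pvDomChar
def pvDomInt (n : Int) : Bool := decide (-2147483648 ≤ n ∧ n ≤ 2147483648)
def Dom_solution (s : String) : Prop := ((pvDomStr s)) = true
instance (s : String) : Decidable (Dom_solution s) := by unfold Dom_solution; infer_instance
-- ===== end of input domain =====

-- B replaces A's flat pass with two ever-growing global counters by a recursive
-- peel-off of one balanced segment per call, detected by 2*matches == length
-- (objective: alternative decomposition, same O(n) cost).

-- ===== PORT A =====
-- state = (answer, count1, count2, current); 'current' is unset before the first
-- iteration in Python but is always assigned there (count1 == count2 holds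
-- initially), so the placeholder ' ' is never read.
def solStep (st : Int × Int × Int × Char) (i : Char) : Int × Int × Int × Char :=
  let (answer, count1, count2, current) := st
  let (answer, current) := if count1 == count2 then (answer + 1, i) else (answer, current)
  if current == i then (answer, count1 + 1, count2, current)
  else (answer, count1, count2 + 1, current)

def solution (s : String) : Int :=
  (s.toList.foldl solStep (0, 0, 0, ' ')).1

-- ===== PORT B =====
-- the 'for j, c in enumerate(s, 1)' loop of Source B: returns the split position j
-- (1-based, counted from the start of the whole call argument) or none
def findSplit (leader : Char) (cs : List Char) (j m : Int) : Option Int :=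
  match cs with
  | [] => none
  | c :: rest =>
    let m' := if c == leader then m + 1 else m
    if 2 * m' = j + 1 then some (j + 1) else findSplit leader rest (j + 1) m'

-- termination helper for segB (the split position is past the leader)
theorem findSplit_lt (leader : Char) :
    ∀ (cs : List Char) (j m r : Int), findSplit leader cs j m = some r → j < r := by
  intro cs
  induction cs with
  | nil => intro j m r h; simp [findSplit] at h
  | cons c rest ih =>
    intro j m r h
    rw [findSplit] at h
    split at h <;> split at h <;>
      first
        | (have := Option.some.inj h; omega)
        | exact lt_trans (by omega) (ih _ _ _ h)

def segB : List Char → Int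
  | [] => 0
  | c :: rest =>
    match h : findSplit c (c :: rest) 0 0 with
    | some r => 1 + segB ((c :: rest).drop r.toNat)
    | none => 1
termination_by cs => cs.length
decreasing_by
  have hr : (0 : Int) < r := findSplit_lt _ _ _ _ _ h
  simp [List.length_drop]
  omega

def solution_alt (s : String) : Int := segB s.toList

-- ===== PRECONDITION & SPEC =====
def Spec_solution (s : String) (out : Int) : Prop := out = solution_alt s
instance (s : String) (out : Int) : Decidable (Spec_solution s out) := by unfold Spec_solution; infer_instance

-- ===== CLAIM (what is proved, stated in full; the proofs are below) =====
def Claim_equal_solution : Prop := ∀ (s : String), Dom_solution s → Spec_solution s (solution s)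

-- ===== LEMMAS AND PROOFS =====

-- proof-only reference partition: 'skipSeg' consumes one segment, 'segCount'
-- counts segments; A's fold and B's recursion are each related to it.
def skipSeg (leader : Char) (bal : Int) (cs : List Char) : List Char :=
  if bal = 0 then cs
  else
    match cs with
    | [] => []
    | d :: ds => skipSeg leader (if d == leader then bal + 1 else bal - 1) ds

theorem skipSeg_zero (leader : Char) (cs : List Char) : skipSeg leader 0 cs = cs := by
  rw [skipSeg.eq_def]; simp

theorem skipSeg_cons (leader d : Char) (bal : Int) (ds : List Char) (h : bal ≠ 0) :
    skipSeg leader bal (d :: ds) = skipSeg leader (if d == leader then bal + 1 else bal - 1) ds := by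
  rw [skipSeg, if_neg h]

theorem skipSeg_length_le (leader : Char) (bal : Int) (cs : List Char) :
    (skipSeg leader bal cs).length ≤ cs.length := by
  induction cs generalizing bal with
  | nil => simp [skipSeg]
  | cons d ds ih =>
    rw [skipSeg]
    split
    · exact le_refl _
    · exact Nat.le_succ_of_le (ih _)

def segCount : List Char → Int
  | [] => 0
  | c :: rest => 1 + segCount (skipSeg c 1 rest)
termination_by cs => cs.length
decreasing_by
  exact Nat.lt_succ_of_le (skipSeg_length_le _ _ _)

-- unfolding A's step in a balanced state: a new segment starts, the leader becomes i
theorem solStep_bal (ans c : Int) (cur i : Char) :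
    solStep (ans, c, c, cur) i = (ans + 1, c + 1, c, i) := by
  simp [solStep]

-- unfolding A's step inside a segment (counters differ)
theorem solStep_mid (ans c1 c2 : Int) (cur i : Char) (h : c1 ≠ c2) :
    solStep (ans, c1, c2, cur) i =
      if cur == i then (ans, c1 + 1, c2, cur) else (ans, c1, c2 + 1, cur) := by
  simp [solStep, h]

-- Inside a segment (count1 ≠ count2), folding A's step equals skipping to the
-- segment end, provided the balanced-state property holds for shorter lists.
theorem inner_lemma (n : Nat)
    (IH : ∀ ds : List Char, ds.length < n → ∀ ans k cur,
      (ds.foldl solStep (ans, k, k, cur)).1 = ans + segCount ds) :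
    ∀ cs : List Char, cs.length < n → ∀ ans c1 c2 cur, c1 ≠ c2 →
      (cs.foldl solStep (ans, c1, c2, cur)).1 = ans + segCount (skipSeg cur (c1 - c2) cs) := by
  intro cs
  induction cs generalizing n with
  | nil =>
    intro _ ans c1 c2 cur hne
    have hb : c1 - c2 ≠ 0 := sub_ne_zero_of_ne hne
    simp [skipSeg, hb, segCount]
  | cons d ds ih =>
    intro hlen ans c1 c2 cur hne
    have hb : c1 - c2 ≠ 0 := sub_ne_zero_of_ne hne
    have hds : ds.length < n := Nat.lt_of_succ_lt hlen
    rw [skipSeg, if_neg hb, List.foldl_cons, solStep_mid _ _ _ _ _ hne]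
    by_cases hcur : cur = d
    · have hbeq : (d == cur) = true := by simp [hcur]
      rw [if_pos (by simp [hcur]), hbeq, if_pos rfl]
      by_cases h1 : c1 + 1 = c2
      · have hz : c1 - c2 + 1 = 0 := by omega
        have hskip : skipSeg cur 0 ds = ds := by rw [skipSeg.eq_def]; simp
        rw [hz, hskip, show c1 + 1 = c2 from h1]
        exact IH ds hds ans c2 cur
      · rw [ih n IH hds ans (c1 + 1) c2 cur h1]
        have : c1 + 1 - c2 = c1 - c2 + 1 := by omega
        rw [this]
    · have hbeq : (d == cur) = false := by
        simp only [beq_eq_false_iff_ne, ne_eq]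
        exact fun h => hcur h.symm
      rw [if_neg (by simpa using fun h => hcur h), hbeq, if_neg (by simp)]
      by_cases h2 : c1 = c2 + 1
      · have hz : c1 - c2 - 1 = 0 := by omega
        have hskip : skipSeg cur 0 ds = ds := by rw [skipSeg.eq_def]; simp
        rw [hz, hskip, show c1 = c2 + 1 from h2]
        exact IH ds hds ans (c2 + 1) cur
      · have h1 : c1 ≠ c2 + 1 := h2
        rw [ih n IH hds ans c1 (c2 + 1) cur h1]
        have : c1 - (c2 + 1) = c1 - c2 - 1 := by omega
        rw [this]

-- Balanced state (count1 = count2): A's fold counts exactly the reference segments.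
theorem main_lemma :
    ∀ cs : List Char, ∀ ans k cur,
      (cs.foldl solStep (ans, k, k, cur)).1 = ans + segCount cs := by
  intro cs
  induction hn : cs.length using Nat.strong_induction_on generalizing cs with
  | _ n SIH =>
    match cs, hn with
    | [], _ => intro ans k cur; simp [segCount]
    | c :: rest, hn =>
      intro ans k cur
      rw [List.foldl_cons, solStep_bal, segCount]
      have hn' : rest.length + 1 = n := by simpa using hn
      have hrest : rest.length < n := by omega
      have := inner_lemma n
        (fun ds hds => SIH ds.length (by omega) ds rfl)
        rest hrest (ans + 1) (k + 1) k c (by omega)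
      rw [this]
      have : k + 1 - k = (1 : Int) := by omega
      rw [this]
      ring

-- B's split search vs the reference skip: with balance 2*m - j, findSplit finds
-- exactly the point where skipSeg's balance returns to 0.
theorem findSplit_skipSeg (leader : Char) :
    ∀ (cs : List Char) (j m : Int), 2 * m - j ≠ 0 →
      (findSplit leader cs j m = none → skipSeg leader (2 * m - j) cs = []) ∧
      (∀ r, findSplit leader cs j m = some r →
        j < r ∧ skipSeg leader (2 * m - j) cs = cs.drop (r - j).toNat) := by
  intro cs
  induction cs with
  | nil =>
    intro j m hb
    constructor
    · intro _; rw [skipSeg, if_neg hb]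
    · intro r h; simp [findSplit] at h
  | cons c rest ih =>
    intro j m hb
    set M : Int := if c == leader then m + 1 else m with hM
    have hF : findSplit leader (c :: rest) j m
        = if 2 * M = j + 1 then some (j + 1) else findSplit leader rest (j + 1) M := by
      rw [findSplit]
    have hstep : skipSeg leader (2 * m - j) (c :: rest)
        = skipSeg leader (2 * M - (j + 1)) rest := by
      rw [skipSeg_cons leader c _ rest hb]
      congr 1
      rw [hM]; split <;> ring
    by_cases hz : 2 * M = j + 1
    · constructor
      · intro h; rw [hF, if_pos hz] at h; exact absurd h (by simp)
      · intro r h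
        rw [hF, if_pos hz] at h
        obtain rfl : j + 1 = r := by simpa using h
        refine ⟨by omega, ?_⟩
        rw [hstep, show 2 * M - (j + 1) = 0 by omega, skipSeg_zero]
        simp
    · have hb' : 2 * M - (j + 1) ≠ 0 := by omega
      constructor
      · intro h; rw [hF, if_neg hz] at h
        rw [hstep]; exact (ih (j + 1) M hb').1 h
      · intro r h
        rw [hF, if_neg hz] at h
        have hi := (ih (j + 1) M hb').2 r h
        refine ⟨by omega, ?_⟩
        rw [hstep, hi.2, show (r - j).toNat = (r - (j + 1)).toNat + 1 by omega]
        simp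

-- B's recursion computes the reference segment count.
theorem segB_eq_segCount : ∀ cs : List Char, segB cs = segCount cs := by
  intro cs
  induction hn : cs.length using Nat.strong_induction_on generalizing cs with
  | _ n SIH =>
    match cs, hn with
    | [], _ => simp [segB, segCount]
    | c :: rest, hn =>
      rw [segB, segCount]
      have hfs : findSplit c (c :: rest) 0 0 = findSplit c rest 1 1 := by
        rw [findSplit]; simp
      cases h : findSplit c (c :: rest) 0 0 with
      | none =>
        have h' : findSplit c rest 1 1 = none := by rw [← hfs]; exact h
        have := (findSplit_skipSeg c rest 1 1 (by omega)).1 h'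
        have hbal : 2 * (1 : Int) - 1 = 1 := by norm_num
        rw [hbal] at this
        show (1:Int) = 1 + segCount (skipSeg c 1 rest)
        rw [this]
        simp [segCount]
      | some r =>
        have h' : findSplit c rest 1 1 = some r := by rw [← hfs]; exact h
        have hi := (findSplit_skipSeg c rest 1 1 (by omega)).2 r h'
        have hbal : 2 * (1 : Int) - 1 = 1 := by norm_num
        rw [hbal] at hi
        have hr : 1 < r := hi.1
        have hdrop : (c :: rest).drop r.toNat = rest.drop (r - 1).toNat := by
          have : r.toNat = (r - 1).toNat + 1 := by omega
          rw [this]; simp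
        show 1 + segB ((c :: rest).drop r.toNat) = 1 + segCount (skipSeg c 1 rest)
        rw [hdrop, ← hi.2]
        have hlen : (skipSeg c 1 rest).length < n := by
          have := skipSeg_length_le c 1 rest
          simp at hn
          omega
        rw [SIH _ hlen _ rfl]

-- ===== VERDICT (by name: the statement is the Claim_ definition above) =====
theorem solution_spec : Claim_equal_solution := by
  intro s _
  unfold Spec_solution solution solution_alt
  rw [segB_eq_segCount]
  simpa using main_lemma s.toList 0 0 ' '
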